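-- pv_equiv track=rewrite | github.com/xiaoxue11/hank_practice | Dict/02_count_triples.py | count_triples1
-- ===== SOURCE A (Python) =====
-- def count_triples1(s, r):
--     count = 0
--     d1 = {}
--     d2 = {}
--     for i in reversed(s):
--         if i * r in d2:
--             count += d2[i * r]
--         if i * r in d1:
--             d2[i] = d2.get(i, 0) + d1[i * r]
--         d1[i] = d1.get(i, 0) + 1
--     return count
-- ===== SOURCE B (Python) =====
-- def count_triples1(s, r):
--     # Enumerate the MIDDLE element of each geometric triple: for each x at
--     # position j, multiply (#earlier i with s[i]*r == x) by (#later k with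
--     # s[k] == x*r).  Only multiplication is used, never division.
--     right = {}
--     for x in s:
--         right[x] = right.get(x, 0) + 1
--     firsts = {}
--     count = 0
--     for x in s:
--         right[x] -= 1                      # right now counts elements strictly after x
--         count += firsts.get(x, 0) * right.get(x * r, 0)
--         firsts[x * r] = firsts.get(x * r, 0) + 1
--     return count
-- ===== Notes on version B (the rewrite author's own statement) =====
-- stated objective: alternative
-- what changed: A scans the list in reverse enumerating the FIRST element of each triple, accumulating pair-counts in d2 keyed by what the first element would be; B scans forward enumerating the MIDDLE element, combining a prefix dict of first-elements with a suffix multiset (a pre-built counter decremented in place), so the counts are multiplied instead of pair-counts being accumulated.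
import Mathlib
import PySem

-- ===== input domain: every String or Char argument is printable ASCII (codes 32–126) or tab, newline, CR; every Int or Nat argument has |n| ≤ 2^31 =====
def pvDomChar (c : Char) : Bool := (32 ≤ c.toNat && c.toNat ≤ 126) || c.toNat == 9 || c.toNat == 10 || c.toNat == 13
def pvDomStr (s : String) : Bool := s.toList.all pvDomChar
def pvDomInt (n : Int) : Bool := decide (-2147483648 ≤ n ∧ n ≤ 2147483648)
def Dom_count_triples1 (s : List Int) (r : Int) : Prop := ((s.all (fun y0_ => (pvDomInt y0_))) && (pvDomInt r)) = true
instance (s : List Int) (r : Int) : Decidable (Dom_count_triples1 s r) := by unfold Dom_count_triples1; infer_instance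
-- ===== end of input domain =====

-- B enumerates the MIDDLE element of each geometric triple (prefix dict × suffix counter)
-- instead of A's reverse scan that accumulates pair-counts keyed by the first element;
-- same asymptotic cost, alternative algorithm.


-- ===== PORT A =====
-- one iteration of A's 'for i in reversed(s)' loop; state = (count, d1, d2)
def aStep (r : Int) (st : Int × PySem.Dict Int Int × PySem.Dict Int Int) (i : Int) :
    Int × PySem.Dict Int Int × PySem.Dict Int Int :=
  let count := if st.2.2.contains (i * r) then st.1 + st.2.2.getD (i * r) 0 else st.1
  let d2 := if st.2.1.contains (i * r) then st.2.2.insert i (st.2.2.getD i 0 + st.2.1.getD (i * r) 0) else st.2.2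
  let d1 := st.2.1.insert i (st.2.1.getD i 0 + 1)
  (count, d1, d2)

def count_triples1 (s : List Int) (r : Int) : Int :=
  (s.reverse.foldl (aStep r) (0, PySem.Dict.empty, PySem.Dict.empty)).1

-- ===== PORT B =====
-- one iteration of B's forward loop; state = (right, firsts, count).
-- 'right[x] -= 1' is ported as insert x (getD x 0 - 1): x is always a key of right
-- here (right was built by counting the same list s), so this is exact.
def bStep (r : Int) (st : PySem.Dict Int Int × PySem.Dict Int Int × Int) (x : Int) :
    PySem.Dict Int Int × PySem.Dict Int Int × Int :=
  let right := st.1.insert x (st.1.getD x 0 - 1)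
  let count := st.2.2 + st.2.1.getD x 0 * right.getD (x * r) 0
  let firsts := st.2.1.insert (x * r) (st.2.1.getD (x * r) 0 + 1)
  (right, firsts, count)

def count_triples1_alt (s : List Int) (r : Int) : Int :=
  let right := s.foldl (fun (d : PySem.Dict Int Int) x => d.insert x (d.getD x 0 + 1)) PySem.Dict.empty
  (s.foldl (bStep r) (right, PySem.Dict.empty, 0)).2.2

-- ===== PRECONDITION & SPEC =====
def Spec_count_triples1 (s : List Int) (r : Int) (out : Int) : Prop := out = count_triples1_alt s r
instance (s : List Int) (r : Int) (out : Int) : Decidable (Spec_count_triples1 s r out) := by unfold Spec_count_triples1; infer_instance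

-- ===== CLAIM (what is proved, stated in full; the proofs are below) =====
def Claim_equal_count_triples1 : Prop := ∀ (s : List Int) (r : Int), Dom_count_triples1 s r → Spec_count_triples1 s r (count_triples1 s r)

-- ===== LEMMAS AND PROOFS =====

-- pairI l a b = number of index pairs p < q in l with l[p] = a and l[q] = b
def pairI (l : List Int) (a b : Int) : Int :=
  match l with
  | [] => 0
  | y :: v => (if y = a then (v.count b : Int) else 0) + pairI v a b

-- GI s r = triple count grouped by the FIRST element (A's grouping)
def GI (s : List Int) (r : Int) : Int :=
  match s with
  | [] => 0
  | x :: v => pairI v (x * r) (x * r * r) + GI v r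

-- Ffun l r c = triple count grouped by the MIDDLE element (B's grouping),
-- c y = number of already-seen elements z with z * r = y
def Ffun (l : List Int) (r : Int) (c : Int → Int) : Int :=
  match l with
  | [] => 0
  | x :: v => c x * (v.count (x * r) : Int) + Ffun v r (fun y => c y + if y = x * r then 1 else 0)

theorem Ffun_shift (r : Int) (xs : List Int) : ∀ (c : Int → Int) (a : Int),
    Ffun xs r (fun y => c y + if y = a then 1 else 0) = Ffun xs r c + pairI xs a (a * r) := by
  induction xs with
  | nil => intro c a; simp [Ffun, pairI]
  | cons x v ih =>
    intro c a
    simp only [Ffun, pairI]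
    have harg : (fun y => (c y + if y = a then 1 else 0) + if y = x * r then 1 else 0)
        = (fun y => (c y + if y = x * r then 1 else 0) + if y = a then 1 else 0) := by
      funext y; ring
    rw [harg, ih (fun y => c y + if y = x * r then 1 else 0) a]
    by_cases h : x = a
    · subst h
      simp
      all_goals ring
    · simp only [if_neg h]
      ring

theorem GI_eq_Ffun (r : Int) (s : List Int) : GI s r = Ffun s r (fun _ => 0) := by
  induction s with
  | nil => simp [GI, Ffun]
  | cons x v ih =>
    simp only [GI, Ffun, ih]
    have harg : (fun y => (0 : Int) + if y = x * r then 1 else 0)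
        = (fun y => (fun _ => (0:Int)) y + if y = x * r then 1 else 0) := by funext y; simp
    rw [harg, Ffun_shift r v (fun _ => 0) (x * r)]
    ring

-- A's loop invariant: after having processed (in reverse order) exactly the suffix p of s,
-- count = GI p r, d1 holds the multiset of p, d2 the pair counts of p.
theorem aLoop (r : Int) (l : List Int) : ∀ (p : List Int) (count : Int) (d1 d2 : PySem.Dict Int Int),
    count = GI p r →
    (∀ v, d1.getD v 0 = (p.count v : Int)) →
    (∀ v, d2.getD v 0 = pairI p v (v * r)) →
    (l.foldl (aStep r) (count, d1, d2)).1 = GI (l.reverse ++ p) r := by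
  induction l with
  | nil => intro p count d1 d2 hc _ _; simpa using hc
  | cons i l ih =>
    intro p count d1 d2 hc h1 h2
    have hstep : aStep r (count, d1, d2) i =
        (count + d2.getD (i * r) 0,
         d1.insert i (d1.getD i 0 + 1),
         if d1.contains (i * r) then d2.insert i (d2.getD i 0 + d1.getD (i * r) 0) else d2) := by
      by_cases h : d2.contains (i * r) = true
      · simp [aStep, h]
      · have h0 : d2.getD (i * r) 0 = 0 :=
          PySem.Dict.getD_of_not_contains _ 0 (by simpa using h)
        simp [aStep, h, h0]
    rw [List.foldl_cons, hstep]
    have hrw : (i :: l).reverse ++ p = l.reverse ++ (i :: p) := by simp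
    rw [hrw]
    apply ih (i :: p)
    · rw [hc, h2]
      simp only [GI]
      ring
    · intro v
      rw [PySem.Dict.getD_insert]
      by_cases hv : v = i
      · subst hv
        rw [if_pos rfl, h1, List.count_cons]
        simp
        all_goals omega
      · rw [if_neg hv, h1, List.count_cons]
        simp [hv]
        all_goals omega
    · intro v
      by_cases hb : d1.contains (i * r) = true
      · rw [if_pos hb, PySem.Dict.getD_insert]
        by_cases hv : v = i
        · subst hv
          rw [if_pos rfl, h2, h1]
          simp [pairI]
          all_goals ring
        · rw [if_neg hv, h2]
          have hne : ¬ i = v := fun h => hv (Eq.symm h)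
          simp [pairI, hne]
          all_goals ring
      · rw [if_neg hb, h2]
        have h0 : d1.getD (i * r) 0 = 0 :=
          PySem.Dict.getD_of_not_contains _ 0 (by simpa using hb)
        have hcnt : (p.count (i * r) : Int) = 0 := by rw [← h1]; exact h0
        by_cases hv : i = v
        · subst hv
          simp only [pairI, if_pos rfl]
          omega
        · simp only [pairI, if_neg hv]
          ring

-- B's loop invariant: right holds the multiset of the remaining list l.
theorem bLoop (r : Int) (l : List Int) : ∀ (right firsts : PySem.Dict Int Int) (count : Int),
    (∀ v, right.getD v 0 = (l.count v : Int)) →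
    (l.foldl (bStep r) (right, firsts, count)).2.2 = count + Ffun l r (fun y => firsts.getD y 0) := by
  induction l with
  | nil => intro right firsts count _; simp [Ffun]
  | cons x v ih =>
    intro right firsts count hr
    rw [List.foldl_cons]
    have hr' : ∀ u, (right.insert x (right.getD x 0 - 1)).getD u 0 = (v.count u : Int) := by
      intro u
      rw [PySem.Dict.getD_insert]
      by_cases hu : u = x
      · subst hu
        rw [if_pos rfl, hr, List.count_cons]
        simp
        all_goals omega
      · rw [if_neg hu, hr, List.count_cons]
        simp [hu]
        all_goals omega
    rw [show bStep r (right, firsts, count) x =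
        (right.insert x (right.getD x 0 - 1),
         firsts.insert (x * r) (firsts.getD (x * r) 0 + 1),
         count + firsts.getD x 0 * (right.insert x (right.getD x 0 - 1)).getD (x * r) 0) from rfl]
    rw [ih _ _ _ hr']
    have harg : (fun y => (firsts.insert (x * r) (firsts.getD (x * r) 0 + 1)).getD y 0)
        = (fun y => firsts.getD y 0 + if y = x * r then 1 else 0) := by
      funext y
      rw [PySem.Dict.getD_insert]
      by_cases hy : y = x * r
      · subst hy; simp
      · simp [hy]
    rw [harg, hr' (x * r)]
    simp only [Ffun]
    ring

-- ===== VERDICT (by name: the statement is the Claim_ definition above) =====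
theorem count_triples1_spec : Claim_equal_count_triples1 := by
  intro s r _
  unfold Spec_count_triples1
  have hA : count_triples1 s r = GI (s.reverse.reverse ++ []) r := by
    unfold count_triples1
    exact aLoop r s.reverse [] 0 PySem.Dict.empty PySem.Dict.empty rfl
      (fun v => by simp [PySem.Dict.getD_empty]) (fun v => by simp [PySem.Dict.getD_empty, pairI])
  have hright : ∀ v, (s.foldl (fun (d : PySem.Dict Int Int) x => d.insert x (d.getD x 0 + 1)) PySem.Dict.empty).getD v 0 = (s.count v : Int) := by
    intro v
    rw [PySem.Dict.getD_foldl_insert_add_one]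
    simp [PySem.Dict.getD_empty]
  have halt : count_triples1_alt s r =
      (s.foldl (bStep r) (s.foldl (fun (d : PySem.Dict Int Int) x => d.insert x (d.getD x 0 + 1)) PySem.Dict.empty, PySem.Dict.empty, 0)).2.2 := rfl
  have hB := bLoop r s _ PySem.Dict.empty 0 hright
  have hempty : (fun y => (PySem.Dict.empty : PySem.Dict Int Int).getD y 0) = (fun _ => (0:Int)) := by
    funext y; simp [PySem.Dict.getD_empty]
  rw [hA, halt, hB, hempty, List.reverse_reverse, List.append_nil, GI_eq_Ffun]
  ring
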